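-- pv_equiv track=rewrite | github.com/robertKrusekopf/AugmentTest | kegelmanager/backend/season_calendar.py | find_best_available_position
-- ===== SOURCE A (Python) =====
-- def find_best_available_position(distribution, ideal_pos, total_slots):
--     """
--     Findet die beste verfügbare Position für einen Cup-Tag in der Nähe der idealen Position.
--     Sucht zuerst nach links, dann nach rechts von der idealen Position.
--     """
--     # Prüfe zuerst die ideale Position
--     if ideal_pos < total_slots and distribution[ideal_pos] == 'FREE_DAY':
--         return ideal_pos
--
--     # Suche in beide Richtungen von der idealen Position
--     max_search_distance = min(20, total_slots // 4)  # Begrenze Suchbereich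
--
--     for distance in range(1, max_search_distance + 1):
--         # Suche nach links
--         left_pos = ideal_pos - distance
--         if left_pos >= 0 and distribution[left_pos] == 'FREE_DAY':
--             return left_pos
--
--         # Suche nach rechts
--         right_pos = ideal_pos + distance
--         if right_pos < total_slots and distribution[right_pos] == 'FREE_DAY':
--             return right_pos
--
--     # Fallback: Finde irgendeine freie Position
--     for pos in range(total_slots):
--         if distribution[pos] == 'FREE_DAY':
--             return pos
--
--     return None  # Keine freie Position gefunden
-- ===== SOURCE B (Python) =====
-- def find_best_available_position(distribution, ideal_pos, total_slots):
--     free = [i for i in range(total_slots) if distribution[i] == 'FREE_DAY']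
--     max_d = min(20, total_slots // 4)
--     near = [p for p in free if abs(p - ideal_pos) <= max_d]
--     if near:
--         return min(near, key=lambda p: (abs(p - ideal_pos), p > ideal_pos))
--     return free[0] if free else None
-- ===== Notes on version B (the rewrite author's own statement) =====
-- stated objective: simpler
-- what changed: Replaces A's three sequential scans (ideal check, expanding left/right ring search, fallback rescan) by one pass that collects the free positions, then takes the key-minimum (distance, right-of-ideal) over those inside the search window, else the first free position. Pre_ excludes inputs outside the natural domain (negative ideal_pos, ideal_pos > total_slots, or total_slots > len(distribution)), where A wraps a negative index, returns positions at or beyond total_slots, or raises IndexError.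
-- outside the precondition, e.g. on find_best_available_position(['FREE_DAY'], -1, 0): A returns -1, B returns None; on find_best_available_position(['X', 'X', 'X', 'X', 'X', 'FREE_DAY', 'X', 'X'], 6, 4): A returns 5, B returns None; on find_best_available_position(['FREE_DAY'], 0, 5): A returns 0, B raises IndexError
import Mathlib
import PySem

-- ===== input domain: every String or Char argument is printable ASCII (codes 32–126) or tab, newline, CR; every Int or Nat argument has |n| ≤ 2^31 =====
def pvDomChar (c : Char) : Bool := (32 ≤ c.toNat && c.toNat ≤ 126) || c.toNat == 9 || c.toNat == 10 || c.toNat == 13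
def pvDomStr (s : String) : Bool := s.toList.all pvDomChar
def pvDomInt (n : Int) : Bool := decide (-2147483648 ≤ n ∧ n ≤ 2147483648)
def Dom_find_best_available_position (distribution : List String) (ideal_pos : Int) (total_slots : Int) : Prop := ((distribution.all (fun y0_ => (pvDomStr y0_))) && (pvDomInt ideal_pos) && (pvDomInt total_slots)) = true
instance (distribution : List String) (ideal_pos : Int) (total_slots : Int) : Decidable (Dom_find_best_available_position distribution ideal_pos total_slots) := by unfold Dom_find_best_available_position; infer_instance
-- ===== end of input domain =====

-- B replaces A's three sequential scans (ideal check, expanding ring search, fallback rescan) by one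
-- collection of the free slots followed by a key-minimum over the in-window ones (objective: simpler).

-- ===== PORT A =====
-- the `for distance in range(1, max_search_distance + 1)` loop with its two early returns
def pvSearchLoop (distribution : List String) (ideal_pos : Int) (total_slots : Int) : List Int → Option Int
  | [] => none
  | d :: rest =>
    if 0 ≤ ideal_pos - d ∧ PySem.List.pyGet? distribution (ideal_pos - d) = some "FREE_DAY" then
      some (ideal_pos - d)
    else if ideal_pos + d < total_slots ∧ PySem.List.pyGet? distribution (ideal_pos + d) = some "FREE_DAY" then
      some (ideal_pos + d)
    else pvSearchLoop distribution ideal_pos total_slots rest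

-- the `for pos in range(total_slots)` fallback loop
def pvFallbackLoop (distribution : List String) : List Int → Option Int
  | [] => none
  | p :: rest =>
    if PySem.List.pyGet? distribution p = some "FREE_DAY" then some p
    else pvFallbackLoop distribution rest

def find_best_available_position (distribution : List String) (ideal_pos : Int) (total_slots : Int) : Option Int :=
  if ideal_pos < total_slots ∧ PySem.List.pyGet? distribution ideal_pos = some "FREE_DAY" then
    some ideal_pos
  else
    let max_search_distance := min 20 (PySem.Int.floordiv total_slots 4)
    match pvSearchLoop distribution ideal_pos total_slots (PySem.List.pyRange 1 (max_search_distance + 1) 1) with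
    | some pos => some pos
    | none => pvFallbackLoop distribution (PySem.List.pyRange 0 total_slots 1)

-- ===== PORT B =====
def find_best_available_position_alt (distribution : List String) (ideal_pos : Int) (total_slots : Int) : Option Int :=
  let free := (PySem.List.pyRange 0 total_slots 1).filter
      (fun i => decide (PySem.List.pyGet? distribution i = some "FREE_DAY"))
  let max_d := min 20 (PySem.Int.floordiv total_slots 4)
  let near := free.filter (fun p => decide (|p - ideal_pos| ≤ max_d))
  match near with
  | [] => free.head?
  | _ :: _ => PySem.List.min2? near (fun p => |p - ideal_pos|) (fun p => decide (ideal_pos < p))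

-- ===== PRECONDITION & SPEC =====
-- Pre_ keeps the function's natural domain: a schedule at least total_slots long and an ideal position
-- inside [0, total_slots] (or a non-positive total_slots, where nothing is scanned); outside it A wraps a
-- negative index, raises IndexError, or returns a position at or beyond total_slots — accidents of A's
-- unguarded indexing that no caller would specify.
def Pre_find_best_available_position (distribution : List String) (ideal_pos : Int) (total_slots : Int) : Prop :=
  (0 ≤ ideal_pos ∧ ideal_pos ≤ total_slots ∧ total_slots ≤ (distribution.length : Int)) ∨
  (total_slots ≤ 0 ∧ total_slots ≤ ideal_pos)
instance (distribution : List String) (ideal_pos : Int) (total_slots : Int) : Decidable (Pre_find_best_available_position distribution ideal_pos total_slots) := by unfold Pre_find_best_available_position; infer_instance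

def pvWitness_find_best_available_position : List String × Int × Int := (["FREE_DAY"], 0, 1)

def Spec_find_best_available_position (distribution : List String) (ideal_pos : Int) (total_slots : Int) (out : Option Int) : Prop := out = find_best_available_position_alt distribution ideal_pos total_slots
instance (distribution : List String) (ideal_pos : Int) (total_slots : Int) (out : Option Int) : Decidable (Spec_find_best_available_position distribution ideal_pos total_slots out) := by unfold Spec_find_best_available_position; infer_instance

-- ===== CLAIM (what is proved, stated in full; the proofs are below) =====
def Claim_equal_find_best_available_position : Prop := ∀ (distribution : List String) (ideal_pos : Int) (total_slots : Int), Dom_find_best_available_position distribution ideal_pos total_slots → Pre_find_best_available_position distribution ideal_pos total_slots → Spec_find_best_available_position distribution ideal_pos total_slots (find_best_available_position distribution ideal_pos total_slots)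

-- ===== LEMMAS AND PROOFS =====

-- abbreviations for the two lists B builds
def pvFree (L : List String) (ts : Int) : List Int :=
  (PySem.List.pyRange 0 ts 1).filter (fun i => decide (PySem.List.pyGet? L i = some "FREE_DAY"))
def pvNear (L : List String) (ip ts md : Int) : List Int :=
  (pvFree L ts).filter (fun p => decide (|p - ip| ≤ md))
-- the candidates A's ring loop inspects, in inspection order
def pvBlock (L : List String) (ip ts d : Int) : List Int :=
  (if 0 ≤ ip - d ∧ PySem.List.pyGet? L (ip - d) = some "FREE_DAY" then [ip - d] else []) ++
  (if ip + d < ts ∧ PySem.List.pyGet? L (ip + d) = some "FREE_DAY" then [ip + d] else [])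
def pvCand (L : List String) (ip ts : Int) (ds : List Int) : List Int := ds.flatMap (pvBlock L ip ts)
-- the strict lexicographic order of B's min key (distance, then right-of-ideal), in the literal
-- shape min2?'s fold tests it
def pvLex2 {α : Type} (k1 : α → Int) (k2 : α → Bool) (x y : α) : Prop :=
  k1 x < k1 y ∨ (¬ (k1 y < k1 x) ∧ k2 x < k2 y)
def pvLt (ip x y : Int) : Prop := pvLex2 (fun p => |p - ip|) (fun p => decide (ip < p)) x y

lemma mem_pvFree {L : List String} {ts p : Int} :
    p ∈ pvFree L ts ↔ 0 ≤ p ∧ p < ts ∧ PySem.List.pyGet? L p = some "FREE_DAY" := by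
  simp [pvFree, List.mem_filter, PySem.List.mem_pyRange_one, and_assoc]

lemma mem_pvNear {L : List String} {ip ts md p : Int} :
    p ∈ pvNear L ip ts md ↔ p ∈ pvFree L ts ∧ |p - ip| ≤ md := by
  simp [pvNear, List.mem_filter]

lemma pvFallbackLoop_eq_head (L : List String) (l : List Int) :
    pvFallbackLoop L l = ((l.filter (fun i => decide (PySem.List.pyGet? L i = some "FREE_DAY"))).head?) := by
  induction l with
  | nil => rfl
  | cons p rest ih =>
    by_cases h : PySem.List.pyGet? L p = some "FREE_DAY"
    · simp [pvFallbackLoop, h]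
    · simp [pvFallbackLoop, h, ih]

lemma pvSearchLoop_eq_head (L : List String) (ip ts : Int) (ds : List Int) :
    pvSearchLoop L ip ts ds = (pvCand L ip ts ds).head? := by
  induction ds with
  | nil => rfl
  | cons d rest ih =>
    simp only [pvSearchLoop, pvCand, List.flatMap_cons, pvBlock]
    split_ifs with h1 h2 <;> simp [pvCand, ih]

lemma mem_pvBlock {L : List String} {ip ts d x : Int} :
    x ∈ pvBlock L ip ts d ↔
      ((x = ip - d ∧ 0 ≤ x ∧ PySem.List.pyGet? L x = some "FREE_DAY") ∨
       (x = ip + d ∧ x < ts ∧ PySem.List.pyGet? L x = some "FREE_DAY")) := by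
  unfold pvBlock
  constructor
  · intro hx
    rcases List.mem_append.mp hx with h | h
    · split_ifs at h with h1
      · simp only [List.mem_singleton] at h
        subst h; exact Or.inl ⟨rfl, h1.1, h1.2⟩
      · simp at h
    · split_ifs at h with h1
      · simp only [List.mem_singleton] at h
        subst h; exact Or.inr ⟨rfl, h1.1, h1.2⟩
      · simp at h
  · rintro (⟨rfl, hx0, hxP⟩ | ⟨rfl, hx0, hxP⟩)
    · exact List.mem_append.mpr (Or.inl (by simp only [hxP, and_true, if_pos hx0]; simp))
    · exact List.mem_append.mpr (Or.inr (by simp only [hxP, and_true, if_pos hx0]; simp))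

lemma abs_of_mem_pvBlock {L : List String} {ip ts d x : Int} (hd : 1 ≤ d)
    (hx : x ∈ pvBlock L ip ts d) : |x - ip| = d := by
  rcases mem_pvBlock.mp hx with ⟨rfl, _, _⟩ | ⟨rfl, _, _⟩ <;>
    rcases abs_cases (ip - d - ip) with ⟨h1, h2⟩ | ⟨h1, h2⟩ <;>
    rcases abs_cases (ip + d - ip) with ⟨h3, h4⟩ | ⟨h3, h4⟩ <;> omega

lemma abs_of_mem_pvCand {L : List String} {ip ts x : Int} {ds : List Int}
    (h1 : ∀ d ∈ ds, 1 ≤ d) (hx : x ∈ pvCand L ip ts ds) : ∃ d ∈ ds, |x - ip| = d := by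
  rcases List.mem_flatMap.mp hx with ⟨d, hd, hxd⟩
  exact ⟨d, hd, abs_of_mem_pvBlock (h1 d hd) hxd⟩

lemma pairwise_pvCand (L : List String) (ip ts : Int) (ds : List Int)
    (h1 : ∀ d ∈ ds, 1 ≤ d) (h2 : ds.Pairwise (· < ·)) :
    (pvCand L ip ts ds).Pairwise (pvLt ip) := by
  induction ds with
  | nil => exact List.Pairwise.nil
  | cons d rest ih =>
    rw [List.pairwise_cons] at h2
    have hd1 : (1:Int) ≤ d := h1 d List.mem_cons_self
    have hrest : ∀ e ∈ rest, 1 ≤ e := fun e he => h1 e (List.mem_cons_of_mem _ he)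
    show ((pvBlock L ip ts d) ++ pvCand L ip ts rest).Pairwise (pvLt ip)
    rw [List.pairwise_append]
    refine ⟨?_, ih hrest h2.2, ?_⟩
    · -- within one ring: at most [ip - d, ip + d], the left one strictly first
      unfold pvBlock
      split_ifs with hl hr hr <;> simp [List.pairwise_cons] <;> try exact List.Pairwise.nil
      · simp only [pvLt, pvLex2]
        right
        constructor
        · rcases abs_cases (ip - d - ip) with ⟨e1, e2⟩ | ⟨e1, e2⟩ <;>
            rcases abs_cases (ip + d - ip) with ⟨e3, e4⟩ | ⟨e3, e4⟩ <;> omega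
        · rw [Bool.lt_iff]
          constructor <;> simp <;> omega
    · intro x hx y hy
      have hdx : |x - ip| = d := abs_of_mem_pvBlock hd1 hx
      rcases abs_of_mem_pvCand hrest hy with ⟨e, he, hey⟩
      have : d < e := h2.1 e he
      simp only [pvLt, pvLex2]
      exact Or.inl (by omega)

lemma head_min {l : List Int} {ip x y : Int} (hp : l.Pairwise (pvLt ip))
    (hh : l.head? = some x) (hy : y ∈ l) : y = x ∨ pvLt ip x y := by
  cases l with
  | nil => simp at hh
  | cons a t =>
    simp only [List.head?_cons, Option.some.injEq] at hh
    subst hh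
    rcases List.mem_cons.mp hy with rfl | hy
    · exact Or.inl rfl
    · exact Or.inr ((List.pairwise_cons.mp hp).1 y hy)

-- the exact step function of PySem.List.min2?
def pvStep {α : Type} (k1 : α → Int) (k2 : α → Bool) : Option α → α → Option α :=
  fun acc x =>
    match acc with
    | none => some x
    | some m =>
      if (decide (k1 x < k1 m) || !decide (k1 m < k1 x) && decide (k2 x < k2 m)) = true then some x
      else some m

lemma pvCond_iff {α : Type} (k1 : α → Int) (k2 : α → Bool) (m x : α) :
    (decide (k1 x < k1 m) || !decide (k1 m < k1 x) && decide (k2 x < k2 m)) = true ↔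
      pvLex2 k1 k2 x m := by
  simp [pvLex2]

lemma pvStep_some_pos {α : Type} {k1 : α → Int} {k2 : α → Bool} {m x : α}
    (h : pvLex2 k1 k2 x m) : pvStep k1 k2 (some m) x = some x := by
  show (if (decide (k1 x < k1 m) || !decide (k1 m < k1 x) && decide (k2 x < k2 m)) = true then some x else some m) = some x
  rw [if_pos ((pvCond_iff k1 k2 m x).mpr h)]

lemma pvStep_some_neg {α : Type} {k1 : α → Int} {k2 : α → Bool} {m x : α}
    (h : ¬ pvLex2 k1 k2 x m) : pvStep k1 k2 (some m) x = some m := by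
  show (if (decide (k1 x < k1 m) || !decide (k1 m < k1 x) && decide (k2 x < k2 m)) = true then some x else some m) = some m
  rw [if_neg (fun hc => h ((pvCond_iff k1 k2 m x).mp hc))]

lemma pvLex2_irrefl {α : Type} (k1 : α → Int) (k2 : α → Bool) (m : α) : ¬ pvLex2 k1 k2 m m := by
  unfold pvLex2; simp

lemma pvLex2_trans {α : Type} (k1 : α → Int) (k2 : α → Bool) {x a m : α}
    (h1 : pvLex2 k1 k2 x a) (h2 : pvLex2 k1 k2 a m) : pvLex2 k1 k2 x m := by
  unfold pvLex2 at *
  rcases h1 with h1 | ⟨h1, h1'⟩ <;> rcases h2 with h2 | ⟨h2, h2'⟩ <;>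
    simp only [Bool.lt_iff] at * <;>
    [left; left; left; right] <;>
    first
      | omega
      | (refine ⟨by omega, ?_, ?_⟩ <;> tauto)

lemma pvLex2_trans' {α : Type} (k1 : α → Int) (k2 : α → Bool) {x a m : α}
    (h1 : ¬ pvLex2 k1 k2 x a) (h2 : pvLex2 k1 k2 x m) : pvLex2 k1 k2 a m := by
  unfold pvLex2 at *
  have hxa : ¬ (k1 x < k1 a) := fun h => h1 (Or.inl h)
  rcases h2 with h2 | ⟨h2, h2'⟩
  · exact Or.inl (by omega)
  · by_cases hk : k1 a < k1 x
    · exact Or.inl (by omega)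
    · have hka : ¬ (k2 x < k2 a) := fun h => h1 (Or.inr ⟨hk, h⟩)
      rw [Bool.lt_iff] at h2' ⊢
      rw [Bool.lt_iff] at hka
      refine Or.inr ⟨by omega, ?_, h2'.2⟩
      cases hcb : k2 a
      · rfl
      · exact absurd ⟨h2'.1, hcb⟩ hka

lemma min2_go {α : Type} (k1 : α → Int) (k2 : α → Bool) :
    ∀ (xs : List α) (a m : α), xs.foldl (pvStep k1 k2) (some a) = some m →
      (m = a ∨ m ∈ xs) ∧ ¬ pvLex2 k1 k2 a m ∧ ∀ y ∈ xs, ¬ pvLex2 k1 k2 y m := by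
  intro xs
  induction xs with
  | nil =>
    intro a m h
    simp only [List.foldl_nil, Option.some.injEq] at h
    subst h
    exact ⟨Or.inl rfl, pvLex2_irrefl k1 k2 _, by simp⟩
  | cons x rest ih =>
    intro a m h
    rw [List.foldl_cons] at h
    by_cases hxa : pvLex2 k1 k2 x a
    · rw [pvStep_some_pos hxa] at h
      obtain ⟨hm, hxm, hall⟩ := ih x m h
      refine ⟨?_, ?_, ?_⟩
      · rcases hm with rfl | hm
        · exact Or.inr List.mem_cons_self
        · exact Or.inr (List.mem_cons_of_mem _ hm)
      · intro ham
        exact hxm (pvLex2_trans k1 k2 hxa ham)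
      · intro y hy
        rcases List.mem_cons.mp hy with rfl | hy
        · exact hxm
        · exact hall y hy
    · rw [pvStep_some_neg hxa] at h
      obtain ⟨hm, ham, hall⟩ := ih a m h
      refine ⟨?_, ham, ?_⟩
      · rcases hm with rfl | hm
        · exact Or.inl rfl
        · exact Or.inr (List.mem_cons_of_mem _ hm)
      · intro y hy
        rcases List.mem_cons.mp hy with rfl | hy
        · intro hym
          exact ham (pvLex2_trans' k1 k2 hxa hym)
        · exact hall y hy

lemma min2_ne_none {α : Type} (k1 : α → Int) (k2 : α → Bool) :
    ∀ (xs : List α) (a : α), xs.foldl (pvStep k1 k2) (some a) ≠ none := by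
  intro xs
  induction xs with
  | nil => intro a h; simp at h
  | cons x rest ih =>
    intro a
    rw [List.foldl_cons]
    by_cases hxa : pvLex2 k1 k2 x a
    · rw [pvStep_some_pos hxa]; exact ih _
    · rw [pvStep_some_neg hxa]; exact ih _

lemma min2_spec {α : Type} (k1 : α → Int) (k2 : α → Bool) (x : α) (t : List α) :
    ∃ m, PySem.List.min2? (x :: t) k1 k2 = some m ∧ m ∈ x :: t ∧
      ∀ y ∈ x :: t, ¬ pvLex2 k1 k2 y m := by
  have heq : PySem.List.min2? (x :: t) k1 k2 = t.foldl (pvStep k1 k2) (some x) := rfl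
  rcases ho : t.foldl (pvStep k1 k2) (some x) with _ | m
  · exact absurd ho (min2_ne_none k1 k2 t x)
  · obtain ⟨hm, hxm, hall⟩ := min2_go k1 k2 t x m ho
    refine ⟨m, heq.trans ho, ?_, ?_⟩
    · rcases hm with rfl | hm
      · exact List.mem_cons_self
      · exact List.mem_cons_of_mem _ hm
    · intro y hy
      rcases List.mem_cons.mp hy with rfl | hy
      · exact hxm
      · exact hall y hy


lemma alt_eq (L : List String) (ip ts : Int) :
    find_best_available_position_alt L ip ts =
      match pvNear L ip ts (min 20 (PySem.Int.floordiv ts 4)) with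
      | [] => (pvFree L ts).head?
      | _ :: _ => PySem.List.min2? (pvNear L ip ts (min 20 (PySem.Int.floordiv ts 4)))
          (fun p => |p - ip|) (fun p => decide (ip < p)) := rfl

lemma a_eq (L : List String) (ip ts : Int) :
    find_best_available_position L ip ts =
      if ip < ts ∧ PySem.List.pyGet? L ip = some "FREE_DAY" then some ip
      else
        match (pvCand L ip ts (PySem.List.pyRange 1 (min 20 (PySem.Int.floordiv ts 4) + 1) 1)).head? with
        | some pos => some pos
        | none => (pvFree L ts).head? := by
  unfold find_best_available_position
  simp only [pvSearchLoop_eq_head, pvFallbackLoop_eq_head]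
  rfl

lemma mem_near_of_mem_cand {L : List String} {ip ts md x : Int} (h0 : 0 ≤ ip) (h1 : ip ≤ ts)
    (hx : x ∈ pvCand L ip ts (PySem.List.pyRange 1 (md + 1) 1)) : x ∈ pvNear L ip ts md := by
  rcases List.mem_flatMap.mp hx with ⟨d, hd, hxd⟩
  have hdm := PySem.List.mem_pyRange_one.mp hd
  have habs := abs_of_mem_pvBlock (by omega) hxd
  rcases mem_pvBlock.mp hxd with ⟨hxe, hx0, hxP⟩ | ⟨hxe, hxts, hxP⟩
  · exact mem_pvNear.mpr ⟨mem_pvFree.mpr ⟨hx0, by omega, hxP⟩, by omega⟩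
  · exact mem_pvNear.mpr ⟨mem_pvFree.mpr ⟨by omega, hxts, hxP⟩, by omega⟩

lemma mem_cand_of_mem_near {L : List String} {ip ts md y : Int}
    (hI : ¬ (ip < ts ∧ PySem.List.pyGet? L ip = some "FREE_DAY"))
    (hy : y ∈ pvNear L ip ts md) : y ∈ pvCand L ip ts (PySem.List.pyRange 1 (md + 1) 1) := by
  obtain ⟨hf, hdist⟩ := mem_pvNear.mp hy
  obtain ⟨hy0, hyts, hyP⟩ := mem_pvFree.mp hf
  have hne : y ≠ ip := by rintro rfl; exact hI ⟨hyts, hyP⟩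
  refine List.mem_flatMap.mpr ⟨|y - ip|, PySem.List.mem_pyRange_one.mpr ⟨?_, by omega⟩, ?_⟩
  · rcases abs_cases (y - ip) with ⟨e1, e2⟩ | ⟨e1, e2⟩ <;> omega
  · apply mem_pvBlock.mpr
    rcases le_or_gt y ip with hle | hlt
    · exact Or.inl ⟨by rcases abs_cases (y - ip) with ⟨e1, e2⟩ | ⟨e1, e2⟩ <;> omega, hy0, hyP⟩
    · exact Or.inr ⟨by rcases abs_cases (y - ip) with ⟨e1, e2⟩ | ⟨e1, e2⟩ <;> omega, hyts, hyP⟩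

-- ===== VERDICT (by name: the statement is the Claim_ definition above) =====
theorem find_best_available_position_spec : Claim_equal_find_best_available_position := by
  intro distribution ideal_pos total_slots hDom hPre
  unfold Spec_find_best_available_position
  rcases hPre with ⟨h0, h1, h2⟩ | ⟨hts, hip⟩
  · -- 0 ≤ ideal_pos ≤ total_slots ≤ len
    have hts0 : (0:Int) ≤ total_slots := le_trans h0 h1
    have hfd0 : 0 ≤ PySem.Int.floordiv total_slots 4 := by
      rw [PySem.Int.floordiv_eq_ediv_of_pos (by norm_num)]
      exact Int.ediv_nonneg hts0 (by norm_num)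
    have hmd0 : 0 ≤ min 20 (PySem.Int.floordiv total_slots 4) := le_min (by norm_num) hfd0
    by_cases hI : ideal_pos < total_slots ∧ PySem.List.pyGet? distribution ideal_pos = some "FREE_DAY"
    · rw [a_eq, if_pos hI, alt_eq]
      have hipnear : ideal_pos ∈ pvNear distribution ideal_pos total_slots
          (min 20 (PySem.Int.floordiv total_slots 4)) :=
        mem_pvNear.mpr ⟨mem_pvFree.mpr ⟨h0, hI.1, hI.2⟩, by simpa using hmd0⟩
      rcases hN : pvNear distribution ideal_pos total_slots
          (min 20 (PySem.Int.floordiv total_slots 4)) with _ | ⟨n, t⟩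
      · rw [hN] at hipnear; simp at hipnear
      · obtain ⟨m, hmeq, hmmem, hmmin⟩ :=
          min2_spec (fun p => |p - ideal_pos|) (fun p => decide (ideal_pos < p)) n t
        rw [hmeq]
        have hipm := hmmin ideal_pos (hN ▸ hipnear)
        have : m = ideal_pos := by
          have h1' : ¬ ((fun p => |p - ideal_pos|) ideal_pos < (fun p => |p - ideal_pos|) m) :=
            fun h => hipm (Or.inl h)
          simp only at h1'
          rcases abs_cases (ideal_pos - ideal_pos) with ⟨e1, e2⟩ | ⟨e1, e2⟩ <;>
            rcases abs_cases (m - ideal_pos) with ⟨e3, e4⟩ | ⟨e3, e4⟩ <;> omega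
        rw [this]
    · rw [a_eq, if_neg hI, alt_eq]
      rcases hC : pvCand distribution ideal_pos total_slots
          (PySem.List.pyRange 1 (min 20 (PySem.Int.floordiv total_slots 4) + 1) 1) with _ | ⟨x, t'⟩
      · rcases hN : pvNear distribution ideal_pos total_slots
            (min 20 (PySem.Int.floordiv total_slots 4)) with _ | ⟨n, t⟩
        · rfl
        · exfalso
          have : n ∈ pvCand distribution ideal_pos total_slots
              (PySem.List.pyRange 1 (min 20 (PySem.Int.floordiv total_slots 4) + 1) 1) :=
            mem_cand_of_mem_near hI (hN ▸ List.mem_cons_self)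
          rw [hC] at this
          simp at this
      · have hxnear : x ∈ pvNear distribution ideal_pos total_slots
            (min 20 (PySem.Int.floordiv total_slots 4)) :=
          mem_near_of_mem_cand h0 h1 (hC ▸ List.mem_cons_self)
        rcases hN : pvNear distribution ideal_pos total_slots
            (min 20 (PySem.Int.floordiv total_slots 4)) with _ | ⟨n, t⟩
        · rw [hN] at hxnear; simp at hxnear
        · obtain ⟨m, hmeq, hmmem, hmmin⟩ :=
            min2_spec (fun p => |p - ideal_pos|) (fun p => decide (ideal_pos < p)) n t
          rw [hmeq]
          have hmC : m ∈ pvCand distribution ideal_pos total_slots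
              (PySem.List.pyRange 1 (min 20 (PySem.Int.floordiv total_slots 4) + 1) 1) :=
            mem_cand_of_mem_near hI (hN ▸ hmmem)
          have hpw := pairwise_pvCand distribution ideal_pos total_slots
              (PySem.List.pyRange 1 (min 20 (PySem.Int.floordiv total_slots 4) + 1) 1)
              (fun d hd => by have := PySem.List.mem_pyRange_one.mp hd; omega)
              (PySem.List.pairwise_lt_pyRange_one _ _)
          have hhead : (pvCand distribution ideal_pos total_slots
              (PySem.List.pyRange 1 (min 20 (PySem.Int.floordiv total_slots 4) + 1) 1)).head?
              = some x := by rw [hC]; rfl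
          rcases head_min hpw hhead hmC with rfl | hlt
          · rfl
          · exact absurd hlt (hmmin x (hN ▸ hxnear))
  · -- total_slots ≤ 0 ≤ nothing is scanned
    have hfd : PySem.Int.floordiv total_slots 4 ≤ 0 := by
      rw [PySem.Int.floordiv_eq_ediv_of_pos (by norm_num)]
      omega
    have hmd : min 20 (PySem.Int.floordiv total_slots 4) ≤ 0 := le_trans (min_le_right _ _) hfd
    have hds : PySem.List.pyRange 1 (min 20 (PySem.Int.floordiv total_slots 4) + 1) 1 = [] := by
      rw [PySem.List.pyRange_one]
      have h00 : ((min 20 (PySem.Int.floordiv total_slots 4) + 1) - 1).toNat = 0 := by omega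
      rw [h00]; rfl
    have hts0 : PySem.List.pyRange 0 total_slots 1 = [] := by
      rw [PySem.List.pyRange_one]
      have h00 : (total_slots - 0).toNat = 0 := by omega
      rw [h00]; rfl
    rw [a_eq, if_neg (fun h => absurd h.1 (by omega)), alt_eq]
    rw [show pvNear distribution ideal_pos total_slots
        (min 20 (PySem.Int.floordiv total_slots 4)) = [] by simp [pvNear, pvFree, hts0]]
    rw [hds]
    simp [pvCand, pvFree, hts0]
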